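-- pv_equiv track=rewrite | github.com/cuity1/Radiation-cooling-and-heating-calculation | glass_comparison_tool/examples/glass_compare.py | get_sampling_dates
-- ===== SOURCE A (Python) =====
-- from typing import List, Dict, Any, Optional, Tuple
--
-- def get_sampling_dates(sampling_mode: str = 'none', year: int = 2024) -> Optional[List[Tuple[int, int]]]:
--     """生成采样日期列表（用于快速模式）
--
--     参数：
--         sampling_mode: 采样模式
--             - 'none': 不采样，计算全年
--             - 'monthly_2weeks': 每月选2周（每月第1-14天）
--             - 'monthly_1week': 每月选1周（每月第1-7天）
--             - 'seasonal': 季节性采样（春夏秋冬各选2周）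
--             - 'representative': 代表性日期（每月选3天：月初、月中、月末）
--         year: 年份
--
--     返回：
--         日期列表 [(month, day), ...] 或 None（表示不采样）
--     """
--     if sampling_mode == 'none':
--         return None
--
--     dates = []
--
--     if sampling_mode == 'monthly_2weeks':
--         # 每月选前2周（1-14日）
--         for month in range(1, 13):
--             for day in range(1, 15):
--                 dates.append((month, day))
--
--     elif sampling_mode == 'monthly_1week':
--         # 每月选前1周（1-7日）
--         for month in range(1, 13):
--             for day in range(1, 8):
--                 dates.append((month, day))
--
--     elif sampling_mode == 'seasonal':
--         # 春夏秋冬各选2周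
--         # 春：3月1-14日
--         for day in range(1, 15):
--             dates.append((3, day))
--         # 夏：6月1-14日
--         for day in range(1, 15):
--             dates.append((6, day))
--         # 秋：9月1-14日
--         for day in range(1, 15):
--             dates.append((9, day))
--         # 冬：12月1-14日
--         for day in range(1, 15):
--             dates.append((12, day))
--
--     elif sampling_mode == 'representative':
--         # 每月选3天：月初(5日)、月中(15日)、月末(25日)
--         for month in range(1, 13):
--             dates.append((month, 5))
--             dates.append((month, 15))
--             dates.append((month, 25))
--
--     return dates
-- ===== SOURCE B (Python) =====
-- def get_sampling_dates(sampling_mode='none', year=2024):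
--     """Closed-form rewrite: instead of nested loops, each mode is reduced to
--     index arithmetic (n, per, mmul, madd, dmul, dadd) and the k-th date is
--     computed directly from k via divmod."""
--     if sampling_mode == 'none':
--         return None
--     params = {
--         'monthly_2weeks': (168, 14, 1, 1, 1, 1),
--         'monthly_1week': (84, 7, 1, 1, 1, 1),
--         'seasonal': (56, 14, 3, 3, 1, 1),
--         'representative': (36, 3, 1, 1, 10, 5),
--     }
--     if sampling_mode not in params:
--         return []
--     n, per, mmul, madd, dmul, dadd = params[sampling_mode]
--     return [(mmul * (k // per) + madd, dmul * (k % per) + dadd) for k in range(n)]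
-- ===== Notes on version B (the rewrite author's own statement) =====
-- stated objective: alternative
-- what changed: Replaces the four hand-written nested/unrolled loops with a single flat pass over range(n) that computes the k-th (month, day) pair in closed form via divmod from a per-mode parameter tuple.
import Mathlib
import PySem

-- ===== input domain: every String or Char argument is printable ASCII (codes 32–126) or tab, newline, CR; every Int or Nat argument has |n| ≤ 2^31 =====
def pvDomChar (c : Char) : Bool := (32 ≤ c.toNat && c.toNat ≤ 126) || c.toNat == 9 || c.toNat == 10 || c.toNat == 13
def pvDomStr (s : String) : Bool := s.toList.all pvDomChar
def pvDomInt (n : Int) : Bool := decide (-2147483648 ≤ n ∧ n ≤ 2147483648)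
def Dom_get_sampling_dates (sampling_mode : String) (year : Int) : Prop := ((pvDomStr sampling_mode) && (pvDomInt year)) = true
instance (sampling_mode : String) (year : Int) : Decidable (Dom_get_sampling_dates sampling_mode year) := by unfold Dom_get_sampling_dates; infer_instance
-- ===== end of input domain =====

-- B replaces A's four hand-written branch loops with a single flat pass computing the k-th date by divmod from per-mode parameters (objective: alternative).


-- ===== PORT A =====
-- Literal transliteration of A: 'none' guard, then four elif branches appending to dates.
def get_sampling_dates (sampling_mode : String) (year : Int) : Option (List (Int × Int)) :=
  if sampling_mode == "none" then none
  else
    let dates : List (Int × Int) := []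
    let dates :=
      if sampling_mode == "monthly_2weeks" then
        (PySem.List.pyRange 1 13 1).foldl (fun acc month =>
          (PySem.List.pyRange 1 15 1).foldl (fun acc2 day => acc2 ++ [(month, day)]) acc) dates
      else if sampling_mode == "monthly_1week" then
        (PySem.List.pyRange 1 13 1).foldl (fun acc month =>
          (PySem.List.pyRange 1 8 1).foldl (fun acc2 day => acc2 ++ [(month, day)]) acc) dates
      else if sampling_mode == "seasonal" then
        let dates := (PySem.List.pyRange 1 15 1).foldl (fun acc day => acc ++ [((3 : Int), day)]) dates
        let dates := (PySem.List.pyRange 1 15 1).foldl (fun acc day => acc ++ [((6 : Int), day)]) dates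
        let dates := (PySem.List.pyRange 1 15 1).foldl (fun acc day => acc ++ [((9 : Int), day)]) dates
        (PySem.List.pyRange 1 15 1).foldl (fun acc day => acc ++ [((12 : Int), day)]) dates
      else if sampling_mode == "representative" then
        (PySem.List.pyRange 1 13 1).foldl (fun acc month =>
          ((acc ++ [(month, (5 : Int))]) ++ [(month, (15 : Int))]) ++ [(month, (25 : Int))]) dates
      else dates
    some dates

-- ===== PORT B =====
-- B's mode -> (n, per, mmul, madd, dmul, dadd) parameter table (a Python dict literal).
def pvSamplingParams : PySem.Dict String (Int × Int × Int × Int × Int × Int) :=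
  PySem.Dict.ofList
    [("monthly_2weeks", (168, 14, 1, 1, 1, 1)),
     ("monthly_1week", (84, 7, 1, 1, 1, 1)),
     ("seasonal", (56, 14, 3, 3, 1, 1)),
     ("representative", (36, 3, 1, 1, 10, 5))]

-- Transliteration of B: table lookup, then one flat pass computing the k-th pair by divmod.
def get_sampling_dates_alt (sampling_mode : String) (year : Int) : Option (List (Int × Int)) :=
  if sampling_mode == "none" then none
  else
    match PySem.Dict.get? pvSamplingParams sampling_mode with
    | none => some []
    | some (n, per, mmul, madd, dmul, dadd) =>
        some ((PySem.List.pyRange 0 n 1).map (fun k =>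
          (mmul * PySem.Int.floordiv k per + madd, dmul * PySem.Int.mod k per + dadd)))

-- ===== PRECONDITION & SPEC =====
def Spec_get_sampling_dates (sampling_mode : String) (year : Int) (out : Option (List (Int × Int))) : Prop := out = get_sampling_dates_alt sampling_mode year
instance (sampling_mode : String) (year : Int) (out : Option (List (Int × Int))) : Decidable (Spec_get_sampling_dates sampling_mode year out) := by unfold Spec_get_sampling_dates; infer_instance

-- ===== CLAIM =====
def Claim_equal_get_sampling_dates : Prop := ∀ (sampling_mode : String) (year : Int), Dom_get_sampling_dates sampling_mode year → Spec_get_sampling_dates sampling_mode year (get_sampling_dates sampling_mode year)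

-- ===== LEMMAS AND PROOFS =====

-- ===== VERDICT =====
set_option maxRecDepth 16384 in
theorem get_sampling_dates_spec : Claim_equal_get_sampling_dates := by
  intro m y _
  unfold Spec_get_sampling_dates
  by_cases h0 : m = "none"
  · subst h0; unfold get_sampling_dates get_sampling_dates_alt; decide
  by_cases h1 : m = "monthly_2weeks"
  · subst h1; unfold get_sampling_dates get_sampling_dates_alt; decide
  by_cases h2 : m = "monthly_1week"
  · subst h2; unfold get_sampling_dates get_sampling_dates_alt; decide
  by_cases h3 : m = "seasonal"
  · subst h3; unfold get_sampling_dates get_sampling_dates_alt; decide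
  by_cases h4 : m = "representative"
  · subst h4; unfold get_sampling_dates get_sampling_dates_alt; decide
  have hn : PySem.Dict.get? pvSamplingParams m = none := by
    simp only [pvSamplingParams, PySem.Dict.ofList, PySem.Dict.update, List.foldl]
    rw [PySem.Dict.get?_insert_of_ne _ _ h4, PySem.Dict.get?_insert_of_ne _ _ h3,
        PySem.Dict.get?_insert_of_ne _ _ h2, PySem.Dict.get?_insert_of_ne _ _ h1,
        PySem.Dict.get?_empty]
  simp [get_sampling_dates, get_sampling_dates_alt, hn, h0, h1, h2, h3, h4]
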